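-- pv_equiv track=rewrite | github.com/pierrbt/projet_bataille_navale | gui/utils.py | getNearestBoatDelta
-- ===== SOURCE A (Python) =====
-- def getNearestBoatDelta(plateau: [[]],
--                         position: ()) -> int:  # Fonction qui retourne le delta entre la position et le bateau le plus proche
--     pos1, pos2 = position # pos1 = ligne, pos2 = colonne
--     delta = 5  # Initialise la variable delta à une valeur maximale (5 dans ce cas)
--
--     # Calcul des bateaux dans la ligne de la position
--     for index, val in enumerate(plateau[pos1]):  # Pour chaque élément de la ligne
--         if val == "#":  # Si l'élément est un bateau
--             if abs(index - pos2) < delta:  # Si la distance entre l'élément et la position est inférieure à delta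
--                 delta = abs(index - pos2)  # On met à jour delta
--
--     # Calcul des bateaux dans la colonne de la position
--     for index, row in enumerate(plateau):  # Pour chaque ligne
--         val = row[pos2]  # On récupère l'élément de la colonne
--         if val == "#":  # Si l'élément est un bateau
--             if abs(index - pos1) < delta:  # Si la distance entre l'élément et la position est inférieure à delta
--                 delta = abs(index - pos1)  # On met à jour delta
--
--     return delta  # On retourne delta
-- ===== SOURCE B (Python) =====
-- def getNearestBoatDelta(plateau, position):
--     # Outward search by increasing distance d; returns first d with a boat
--     # in the row or column, else 5. (Negative positions index from the end,
--     # as in the original.)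
--     pos1, pos2 = position
--     row = plateau[pos1]
--     for d in range(5):
--         for j in (pos2 - d, pos2 + d):
--             if 0 <= j < len(row) and row[j] == "#":
--                 return d
--         for i in (pos1 - d, pos1 + d):
--             if 0 <= i < len(plateau) and plateau[i][pos2] == "#":
--                 return d
--     return 5
-- ===== Notes on version B (the rewrite author's own statement) =====
-- stated objective: alternative
-- what changed: Replaces the two full row/column scans that keep a running minimum by an outward search over candidate distances d = 0..4 that probes only the four cells at distance d and returns the first hit (early termination), 5 if none.
import Mathlib
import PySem

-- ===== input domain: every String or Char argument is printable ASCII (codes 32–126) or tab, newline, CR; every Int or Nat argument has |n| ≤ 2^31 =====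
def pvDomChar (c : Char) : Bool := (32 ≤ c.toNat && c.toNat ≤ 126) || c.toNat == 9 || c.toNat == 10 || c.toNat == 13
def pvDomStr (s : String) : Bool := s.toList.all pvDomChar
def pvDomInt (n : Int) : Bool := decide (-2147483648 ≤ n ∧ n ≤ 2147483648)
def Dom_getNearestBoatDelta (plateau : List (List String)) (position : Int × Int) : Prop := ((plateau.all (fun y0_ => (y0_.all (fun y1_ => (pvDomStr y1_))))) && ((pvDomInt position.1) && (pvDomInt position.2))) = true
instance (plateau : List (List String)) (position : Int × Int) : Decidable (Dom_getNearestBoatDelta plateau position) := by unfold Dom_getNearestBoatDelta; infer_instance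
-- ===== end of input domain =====

-- B replaces the two full row/column minimum scans by an outward search over
-- candidate distances d = 0..4 with early termination (objective: alternative).

-- ===== PORT A =====
def getNearestBoatDelta (plateau : List (List String)) (position : Int × Int) : Int :=
  let pos1 := position.1
  let pos2 := position.2
  -- delta = 5; row scan over enumerate(plateau[pos1])
  let delta1 : Int :=
    (PySem.List.enumerate ((PySem.List.pyGet? plateau pos1).getD [])).foldl
      (fun delta p =>
        if p.2 = "#" then
          if |p.1 - pos2| < delta then |p.1 - pos2| else delta
        else delta) 5
  -- column scan over enumerate(plateau); val = row[pos2]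
  (PySem.List.enumerate plateau).foldl
    (fun delta p =>
      let val := (PySem.List.pyGet? p.2 pos2).getD ""
      if val = "#" then
        if |p.1 - pos1| < delta then |p.1 - pos1| else delta
      else delta) delta1

-- ===== PORT B =====
-- '0 <= j < len(row) and row[j] == "#"'
def pvRowCheck (row : List String) (j : Int) : Bool :=
  decide (0 ≤ j) && decide (j < (row.length : Int)) &&
    ((PySem.List.pyGet? row j).getD "" == "#")

-- '0 <= i < len(plateau) and plateau[i][pos2] == "#"'
def pvColCheck (plateau : List (List String)) (pos2 i : Int) : Bool :=
  decide (0 ≤ i) && decide (i < (plateau.length : Int)) &&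
    ((PySem.List.pyGet? ((PySem.List.pyGet? plateau i).getD []) pos2).getD "" == "#")

def getNearestBoatDelta_alt (plateau : List (List String)) (position : Int × Int) : Int :=
  let pos1 := position.1
  let pos2 := position.2
  let row := (PySem.List.pyGet? plateau pos1).getD []
  -- for d in range(5): return d as soon as one of the four guarded cells is a boat
  match (PySem.List.pyRange 0 5 1).find? (fun d =>
      pvRowCheck row (pos2 - d) || pvRowCheck row (pos2 + d) ||
      pvColCheck plateau pos2 (pos1 - d) || pvColCheck plateau pos2 (pos1 + d)) with
  | some d => d
  | none => 5

-- ===== PRECONDITION & SPEC =====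
-- Pre_ excludes exactly the inputs where A raises IndexError: plateau[pos1]
-- must exist and row[pos2] must exist for every row (Python indexing, so
-- negative indices count from the end).
def Pre_getNearestBoatDelta (plateau : List (List String)) (position : Int × Int) : Prop :=
  PySem.Raise.InRange plateau.length position.1 ∧
  ∀ r ∈ plateau, PySem.Raise.InRange r.length position.2

instance (plateau : List (List String)) (position : Int × Int) : Decidable (Pre_getNearestBoatDelta plateau position) := by unfold Pre_getNearestBoatDelta; infer_instance

def pvWitness_getNearestBoatDelta : List (List String) × (Int × Int) :=
  ([[".", "#"], [".", "."]], (1, 0))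

def Spec_getNearestBoatDelta (plateau : List (List String)) (position : Int × Int) (out : Int) : Prop := out = getNearestBoatDelta_alt plateau position
instance (plateau : List (List String)) (position : Int × Int) (out : Int) : Decidable (Spec_getNearestBoatDelta plateau position out) := by unfold Spec_getNearestBoatDelta; infer_instance

-- ===== CLAIM (what is proved, stated in full; the proofs are below) =====
def Claim_equal_getNearestBoatDelta : Prop := ∀ (plateau : List (List String)) (position : Int × Int), Dom_getNearestBoatDelta plateau position → Pre_getNearestBoatDelta plateau position → Spec_getNearestBoatDelta plateau position (getNearestBoatDelta plateau position)

-- ===== LEMMAS AND PROOFS =====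

-- characterisation of A's fold step 'if c x then (if g x < a then g x else a) else a'
theorem pvFold_le_init {α : Type} (c : α → Prop) [DecidablePred c] (g : α → Int)
    (l : List α) (δ : Int) :
    l.foldl (fun a x => if c x then (if g x < a then g x else a) else a) δ ≤ δ := by
  induction l generalizing δ with
  | nil => simp
  | cons x t ih =>
    simp only [List.foldl_cons]
    have h := ih (if c x then (if g x < (δ:Int) then g x else δ) else δ)
    have : (if c x then (if g x < (δ:Int) then g x else δ) else δ) ≤ δ := by
      split_ifs <;> omega
    omega

theorem pvFold_mem {α : Type} (c : α → Prop) [DecidablePred c] (g : α → Int)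
    (l : List α) (δ : Int) :
    l.foldl (fun a x => if c x then (if g x < a then g x else a) else a) δ = δ ∨
      ∃ x ∈ l, c x ∧
        l.foldl (fun a x => if c x then (if g x < a then g x else a) else a) δ = g x := by
  induction l generalizing δ with
  | nil => left; rfl
  | cons x t ih =>
    simp only [List.foldl_cons]
    rcases ih (if c x then (if g x < (δ:Int) then g x else δ) else δ) with h | ⟨y, hy, hcy, hval⟩
    · by_cases hc : c x
      · by_cases hlt : g x < δ
        · right; refine ⟨x, by simp, hc, ?_⟩; rw [h]; simp [hc, hlt]
        · left; rw [h]; simp [hc, hlt]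
      · left; rw [h]; simp [hc]
    · right; exact ⟨y, List.mem_cons_of_mem _ hy, hcy, hval⟩

theorem pvFold_lb {α : Type} (c : α → Prop) [DecidablePred c] (g : α → Int)
    (l : List α) (δ : Int) (x : α) (hx : x ∈ l) (hc : c x) :
    l.foldl (fun a x => if c x then (if g x < a then g x else a) else a) δ ≤ g x := by
  induction l generalizing δ with
  | nil => cases hx
  | cons y t ih =>
    simp only [List.foldl_cons]
    rcases List.mem_cons.mp hx with rfl | hxt
    · have h := pvFold_le_init c g t (if c x then (if g x < (δ:Int) then g x else δ) else δ)
      have : (if c x then (if g x < (δ:Int) then g x else δ) else δ) ≤ g x := by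
        simp only [hc, if_pos]; split_ifs <;> omega
      omega
    · exact ih _ hxt

-- membership in PySem.List.enumerate
theorem pvMem_enumerate_iff {α : Type} (xs : List α) (s : Int) (p : Int × α) :
    p ∈ PySem.List.enumerate xs s ↔ ∃ k : Nat, p.1 = s + k ∧ xs[k]? = some p.2 := by
  induction xs generalizing s with
  | nil => simp [PySem.List.enumerate_nil]
  | cons x t ih =>
    rw [PySem.List.enumerate_cons, List.mem_cons, ih (s + 1)]
    constructor
    · rintro (rfl | ⟨k, hk, hget⟩)
      · exact ⟨0, by simp⟩
      · exact ⟨k + 1, by push_cast; omega, by simpa using hget⟩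
    · rintro ⟨k, hk, hget⟩
      cases k with
      | zero =>
        left
        simp at hget
        obtain ⟨a, b⟩ := p
        simp only [Prod.mk.injEq]
        simp at hk
        exact ⟨hk, hget.symm⟩
      | succ k =>
        right
        exact ⟨k, by push_cast at hk ⊢; omega, by simpa using hget⟩

theorem pvRowCheck_iff (row : List String) (j : Int) :
    pvRowCheck row j = true ↔
      ∃ p ∈ PySem.List.enumerate row, p.2 = "#" ∧ p.1 = j := by
  unfold pvRowCheck
  simp only [Bool.and_eq_true, decide_eq_true_eq, beq_iff_eq]
  constructor
  · rintro ⟨⟨h0, hlt⟩, hval⟩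
    have hj : j = ((j.toNat : Nat) : Int) := by omega
    rw [hj, PySem.List.pyGet?_natCast] at hval
    have hk : j.toNat < row.length := by omega
    refine ⟨(j, row[j.toNat]), ?_, ?_, rfl⟩
    · rw [pvMem_enumerate_iff]
      refine ⟨j.toNat, ?_, ?_⟩
      · simp; omega
      · rw [List.getElem?_eq_getElem hk]
    · simpa [List.getElem?_eq_getElem hk] using hval
  · rintro ⟨p, hp, hhash, rfl⟩
    rw [pvMem_enumerate_iff] at hp
    obtain ⟨k, hk1, hk2⟩ := hp
    have hklen : k < row.length := by
      by_contra h
      rw [List.getElem?_eq_none (Nat.le_of_not_lt h)] at hk2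
      cases hk2
    have h0 : (0:Int) ≤ p.1 := by omega
    refine ⟨⟨h0, by omega⟩, ?_⟩
    have : p.1 = ((k : Nat) : Int) := by omega
    rw [this, PySem.List.pyGet?_natCast, hk2]
    simpa using hhash

theorem pvColCheck_iff (plateau : List (List String)) (pos2 i : Int) :
    pvColCheck plateau pos2 i = true ↔
      ∃ p ∈ PySem.List.enumerate plateau,
        (PySem.List.pyGet? p.2 pos2).getD "" = "#" ∧ p.1 = i := by
  unfold pvColCheck
  simp only [Bool.and_eq_true, decide_eq_true_eq, beq_iff_eq]
  constructor
  · rintro ⟨⟨h0, hlt⟩, hval⟩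
    have hj : i = ((i.toNat : Nat) : Int) := by omega
    rw [hj, PySem.List.pyGet?_natCast] at hval
    have hk : i.toNat < plateau.length := by omega
    refine ⟨(i, plateau[i.toNat]), ?_, ?_, rfl⟩
    · rw [pvMem_enumerate_iff]
      refine ⟨i.toNat, ?_, ?_⟩
      · simp; omega
      · rw [List.getElem?_eq_getElem hk]
    · simpa [List.getElem?_eq_getElem hk] using hval
  · rintro ⟨p, hp, hhash, rfl⟩
    rw [pvMem_enumerate_iff] at hp
    obtain ⟨k, hk1, hk2⟩ := hp
    have hklen : k < plateau.length := by
      by_contra h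
      rw [List.getElem?_eq_none (Nat.le_of_not_lt h)] at hk2
      cases hk2
    have h0 : (0:Int) ≤ p.1 := by omega
    refine ⟨⟨h0, by omega⟩, ?_⟩
    have : p.1 = ((k : Nat) : Int) := by omega
    rw [this, PySem.List.pyGet?_natCast, hk2]
    simpa using hhash

-- main equivalence, stated over the destructured position
theorem pvMain (plateau : List (List String)) (pos1 pos2 : Int) :
    getNearestBoatDelta plateau (pos1, pos2) = getNearestBoatDelta_alt plateau (pos1, pos2) := by
  set row := (PySem.List.pyGet? plateau pos1).getD [] with hrow
  -- the predicate B tests at distance d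
  set bp : Int → Bool := fun d =>
      pvRowCheck row (pos2 - d) || pvRowCheck row (pos2 + d) ||
      pvColCheck plateau pos2 (pos1 - d) || pvColCheck plateau pos2 (pos1 + d) with hbp
  -- 'a boat at distance d' as A sees it
  set P : Int → Prop := fun d =>
      (∃ p ∈ PySem.List.enumerate row, p.2 = "#" ∧ |p.1 - pos2| = d) ∨
      (∃ p ∈ PySem.List.enumerate plateau,
          (PySem.List.pyGet? p.2 pos2).getD "" = "#" ∧ |p.1 - pos1| = d) with hP
  -- B's predicate is exactly P for 0 ≤ d
  have hit_iff : ∀ d : Int, 0 ≤ d → (bp d = true ↔ P d) := by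
    intro d hd
    simp only [hbp, hP, Bool.or_eq_true, pvRowCheck_iff, pvColCheck_iff]
    constructor
    · rintro (((⟨p, hp, hh, he⟩ | ⟨p, hp, hh, he⟩) | ⟨p, hp, hh, he⟩) | ⟨p, hp, hh, he⟩)
      · exact Or.inl ⟨p, hp, hh, by rw [abs_eq hd]; omega⟩
      · exact Or.inl ⟨p, hp, hh, by rw [abs_eq hd]; omega⟩
      · exact Or.inr ⟨p, hp, hh, by rw [abs_eq hd]; omega⟩
      · exact Or.inr ⟨p, hp, hh, by rw [abs_eq hd]; omega⟩
    · rintro (⟨p, hp, hh, he⟩ | ⟨p, hp, hh, he⟩)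
      · rw [abs_eq hd] at he
        rcases he with he | he
        · exact Or.inl (Or.inl (Or.inr ⟨p, hp, hh, by omega⟩))
        · exact Or.inl (Or.inl (Or.inl ⟨p, hp, hh, by omega⟩))
      · rw [abs_eq hd] at he
        rcases he with he | he
        · exact Or.inr ⟨p, hp, hh, by omega⟩
        · exact Or.inl (Or.inr ⟨p, hp, hh, by omega⟩)
  -- characterise A
  set A := getNearestBoatDelta plateau (pos1, pos2) with hA
  set F1 : Int := (PySem.List.enumerate row).foldl
      (fun delta p => if p.2 = "#" then
          (if |p.1 - pos2| < delta then |p.1 - pos2| else delta) else delta) 5 with hF1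
  have hAdef : A = (PySem.List.enumerate plateau).foldl
      (fun delta p => if (PySem.List.pyGet? p.2 pos2).getD "" = "#" then
          (if |p.1 - pos1| < delta then |p.1 - pos1| else delta) else delta) F1 := by
    rw [hA]; unfold getNearestBoatDelta; rfl
  have hAle5 : A ≤ 5 := by
    rw [hAdef]
    have h1 := pvFold_le_init (fun p : Int × String => p.2 = "#")
        (fun p => |p.1 - pos2|) (PySem.List.enumerate row) 5
    have h2 := pvFold_le_init (fun p : Int × List String => (PySem.List.pyGet? p.2 pos2).getD "" = "#")
        (fun p => |p.1 - pos1|) (PySem.List.enumerate plateau) F1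
    simp only [] at h1 h2
    rw [← hF1] at h1
    omega
  have hAmem : A = 5 ∨ P A := by
    rw [hAdef]
    rcases pvFold_mem (fun p : Int × List String => (PySem.List.pyGet? p.2 pos2).getD "" = "#")
        (fun p => |p.1 - pos1|) (PySem.List.enumerate plateau) F1 with h | ⟨p, hp, hc, hv⟩
    · rw [h, hF1]
      rcases pvFold_mem (fun p : Int × String => p.2 = "#")
          (fun p => |p.1 - pos2|) (PySem.List.enumerate row) 5 with h1 | ⟨p, hp, hc, hv⟩
      · left; exact h1
      · right; exact Or.inl ⟨p, hp, hc, hv.symm⟩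
    · right; exact Or.inr ⟨p, hp, hc, hv.symm⟩
  have hAlb : ∀ d, P d → A ≤ d := by
    rintro d (⟨p, hp, hc, hv⟩ | ⟨p, hp, hc, hv⟩)
    · have h1 := pvFold_lb (fun p : Int × String => p.2 = "#")
          (fun p => |p.1 - pos2|) (PySem.List.enumerate row) 5 p hp hc
      have h2 := pvFold_le_init (fun p : Int × List String => (PySem.List.pyGet? p.2 pos2).getD "" = "#")
          (fun p => |p.1 - pos1|) (PySem.List.enumerate plateau) F1
      simp only [] at h1 h2
      rw [← hF1] at h1
      rw [hAdef]; omega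
    · have h2 := pvFold_lb (fun p : Int × List String => (PySem.List.pyGet? p.2 pos2).getD "" = "#")
          (fun p => |p.1 - pos1|) (PySem.List.enumerate plateau) F1 p hp hc
      simp only [] at h2
      rw [hAdef]; omega
  have hAnn : P A → 0 ≤ A := by
    rintro (⟨p, _, _, hv⟩ | ⟨p, _, _, hv⟩) <;> (rw [← hv]; positivity)
  -- unfold B
  have hBdef : getNearestBoatDelta_alt plateau (pos1, pos2) =
      match List.find? bp [0, 1, 2, 3, 4] with
      | some d => d
      | none => 5 := by
    unfold getNearestBoatDelta_alt
    have : PySem.List.pyRange 0 5 1 = [0, 1, 2, 3, 4] := by decide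
    simp only [this, hbp]
    rfl
  rw [hBdef]
  -- helper: if bp d fails for all e < d but P A holds with A < d, contradiction
  have key : ∀ d : Int, 0 ≤ d → d ≤ 5 → (∀ e : Int, 0 ≤ e → e < d → ¬ P e) →
      (bp d = true → A = d) := by
    intro d h0 _ hbelow hd
    have hPd : P d := (hit_iff d h0).mp hd
    have h1 : A ≤ d := hAlb d hPd
    rcases hAmem with h5 | hPA
    · omega
    · have := hAnn hPA
      by_contra hne
      exact hbelow A this (by omega) hPA
  have hnone : (∀ e : Int, 0 ≤ e → e < 5 → ¬ P e) → A = 5 := by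
    intro hbelow
    rcases hAmem with h5 | hPA
    · exact h5
    · have h0 := hAnn hPA
      have := hAlb A hPA
      by_cases h : A < 5
      · exact absurd hPA (hbelow A h0 h)
      · omega
  -- exhaust the five distances
  have np : ∀ e : Int, 0 ≤ e → bp e = false → ¬ P e := by
    intro e he hf hP
    rw [(hit_iff e he).mpr hP] at hf
    simp at hf
  cases h0 : bp 0 with
  | true =>
    rw [List.find?_cons_of_pos h0]
    exact key 0 (by omega) (by omega) (by omega) h0
  | false =>
    rw [List.find?_cons_of_neg (by simp [h0])]
    have n0 := np 0 (by omega) h0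
    cases h1 : bp 1 with
    | true =>
      rw [List.find?_cons_of_pos h1]
      exact key 1 (by omega) (by omega) (fun e he hlt => by
        have : e = 0 := by omega
        subst this; exact n0) h1
    | false =>
      rw [List.find?_cons_of_neg (by simp [h1])]
      have n1 := np 1 (by omega) h1
      cases h2 : bp 2 with
      | true =>
        rw [List.find?_cons_of_pos h2]
        exact key 2 (by omega) (by omega) (fun e he hlt => by
          interval_cases e
          · exact n0
          · exact n1) h2
      | false =>
        rw [List.find?_cons_of_neg (by simp [h2])]
        have n2 := np 2 (by omega) h2
        cases h3 : bp 3 with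
        | true =>
          rw [List.find?_cons_of_pos h3]
          exact key 3 (by omega) (by omega) (fun e he hlt => by
            interval_cases e
            · exact n0
            · exact n1
            · exact n2) h3
        | false =>
          rw [List.find?_cons_of_neg (by simp [h3])]
          have n3 := np 3 (by omega) h3
          cases h4 : bp 4 with
          | true =>
            rw [List.find?_cons_of_pos h4]
            exact key 4 (by omega) (by omega) (fun e he hlt => by
              interval_cases e
              · exact n0
              · exact n1
              · exact n2
              · exact n3) h4
          | false =>
            rw [List.find?_cons_of_neg (by simp [h4])]
            simp only [List.find?_nil]
            exact hnone (fun e he hlt => by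
              interval_cases e
              · exact n0
              · exact n1
              · exact n2
              · exact n3
              · exact np 4 (by omega) h4)

-- ===== VERDICT (by name: the statement is the Claim_ definition above) =====
theorem getNearestBoatDelta_spec : Claim_equal_getNearestBoatDelta := by
  intro plateau position _ _
  obtain ⟨p1, p2⟩ := position
  exact pvMain plateau p1 p2
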